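-- pv_equiv track=rewrite | github.com/fabiano-ol/codev_fundamentos | Codev.py | getFirstLines
-- ===== SOURCE A (Python) =====
-- def getFirstLines(text, n):
-- 	i = -1
-- 	for j in range(n):
-- 		i = text.find('\n', i+1)
-- 		if i == -1:
-- 			i = len(text)
-- 			break
-- 	if i == -1:
-- 		i = 0
-- 	return text[:i]
-- ===== SOURCE B (Python) =====
-- def getFirstLines(text, n):
-- 	return '\n'.join(text.split('\n')[:max(0, n)])
-- ===== Notes on version B (the rewrite author's own statement) =====
-- stated objective: simpler
-- what changed: Replaces A's stateful early-stopping scan with repeated str.find calls and index bookkeeping by a one-liner that splits the whole text on newlines, slices the first max(0,n) parts and rejoins them.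
import Mathlib
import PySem

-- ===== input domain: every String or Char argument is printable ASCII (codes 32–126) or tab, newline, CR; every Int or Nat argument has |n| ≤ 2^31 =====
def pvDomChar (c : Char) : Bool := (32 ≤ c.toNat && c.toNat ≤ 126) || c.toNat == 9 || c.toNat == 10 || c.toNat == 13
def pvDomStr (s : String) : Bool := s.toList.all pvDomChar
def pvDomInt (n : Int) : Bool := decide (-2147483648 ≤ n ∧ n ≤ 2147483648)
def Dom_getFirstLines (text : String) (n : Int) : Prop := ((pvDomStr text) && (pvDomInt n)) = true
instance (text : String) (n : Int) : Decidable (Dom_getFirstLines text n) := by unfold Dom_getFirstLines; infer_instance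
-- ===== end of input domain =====

-- B replaces A's stateful early-stopping scan (repeated str.find with index bookkeeping) by split('\n') / slice / rejoin; objective: simpler.

-- ===== PORT A =====
-- A's 'for j in range(n)' loop: state i, fuel = remaining iterations (the body never reads j;
-- 'break' after 'i = len(text)' is the immediate return of len(text), since A then leaves the loop with that i)
def getFirstLinesLoop (cs : List Char) : Nat → Int → Int
  | 0, i => i
  | Nat.succ k, i =>
      let i' := PySem.Chars.findFrom cs ['\n'] (i + 1)
      if i' = -1 then (cs.length : Int) else getFirstLinesLoop cs k i'

def getFirstLines (text : String) (n : Int) : String :=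
  let cs := text.toList
  let i := getFirstLinesLoop cs n.toNat (-1)
  let i := if i = -1 then 0 else i
  String.ofList (PySem.Chars.slice cs none (some i))

-- ===== PORT B =====
-- B: '\n'.join(text.split('\n')[:max(0, n)])
def getFirstLines_alt (text : String) (n : Int) : String :=
  String.ofList (PySem.Chars.join ['\n']
    (List.take (max 0 n).toNat (PySem.Chars.splitOn text.toList ['\n'])))

-- ===== PRECONDITION & SPEC =====
def Spec_getFirstLines (text : String) (n : Int) (out : String) : Prop := out = getFirstLines_alt text n
instance (text : String) (n : Int) (out : String) : Decidable (Spec_getFirstLines text n out) := by unfold Spec_getFirstLines; infer_instance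

-- ===== CLAIM (what is proved, stated in full; the proofs are below) =====
def Claim_equal_getFirstLines : Prop := ∀ (text : String) (n : Int), Dom_getFirstLines text n → Spec_getFirstLines text n (getFirstLines text n)

-- ===== LEMMAS AND PROOFS =====
def spl : List Char → List Char × List (List Char)
  | [] => ([], [])
  | c :: r => if c = '\n' then ([], (spl r).1 :: (spl r).2) else (c :: (spl r).1, (spl r).2)

theorem spl_go : ∀ (fuel : Nat) (l cur : List Char) (acc : List (List Char)),
    l.length < fuel →
    PySem.Chars.splitOn.go ['\n'] fuel l cur acc
    = acc.reverse ++ (cur.reverse ++ (spl l).1) :: (spl l).2 := by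
  intro fuel
  induction fuel with
  | zero => intro l cur acc h; omega
  | succ f ih =>
    intro l cur acc h
    cases l with
    | nil => simp [PySem.Chars.splitOn.go, spl]
    | cons c rest =>
      by_cases hc : c = '\n'
      · subst hc
        simp only [PySem.Chars.splitOn.go, List.isPrefixOf, spl]
        simp [ih rest [] _ (by simpa using Nat.lt_of_succ_lt_succ h)]
      · simp only [PySem.Chars.splitOn.go, List.isPrefixOf, spl]
        have hcc : ('\n' == c) = false := by simp; intro h'; exact hc h'.symm
        simp only [hcc, Bool.false_and, Bool.false_eq_true, if_false, if_neg hc]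
        rw [ih rest (c :: cur) acc (by simpa using Nat.lt_of_succ_lt_succ h)]
        simp

theorem splitOn_eq_spl (cs : List Char) :
    PySem.Chars.splitOn cs ['\n'] = (spl cs).1 :: (spl cs).2 := by
  rw [PySem.Chars.splitOn, spl_go (cs.length+1) cs [] [] (by omega)]
  simp

theorem spl_no_nl : ∀ {cs : List Char}, '\n' ∉ cs → spl cs = (cs, []) := by
  intro cs h
  induction cs with
  | nil => simp [spl]
  | cons c r ih =>
    simp only [List.mem_cons, not_or] at h
    simp [spl, Ne.symm h.1, ih h.2]

theorem spl_append : ∀ {p : List Char} (b : List Char), '\n' ∉ p →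
    spl (p ++ '\n' :: b) = (p, (spl b).1 :: (spl b).2) := by
  intro p
  induction p with
  | nil => intro b _; simp [spl]
  | cons c r ih =>
    intro b h
    simp only [List.mem_cons, not_or] at h
    simp [spl, Ne.symm h.1, ih b h.2]

theorem findFrom_ge_neg_one (cs sub : List Char) (st : Int) (h : 0 ≤ st) :
    -1 ≤ PySem.Chars.findFrom cs sub st := by
  simp only [PySem.Chars.findFrom, if_neg (by omega : ¬ st < 0)]
  split_ifs with h1 h2
  · omega
  · omega
  · have := PySem.Chars.neg_one_le_find (List.drop st.toNat (List.take (cs.length:Int).toNat cs)) sub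
    omega

theorem findFrom_nonneg_of_ne (cs sub : List Char) (st : Int) (h : 0 ≤ st)
    (hne : PySem.Chars.findFrom cs sub st ≠ -1) : 0 ≤ PySem.Chars.findFrom cs sub st := by
  have := findFrom_ge_neg_one cs sub st h
  omega

theorem loop_nonneg_of_nonneg (cs : List Char) : ∀ (k : Nat) (i : Int), 0 ≤ i →
    0 ≤ getFirstLinesLoop cs k i := by
  intro k
  induction k with
  | zero => intro i h; simpa [getFirstLinesLoop] using h
  | succ k ih =>
    intro i h
    simp only [getFirstLinesLoop]
    split_ifs with h1
    · omega
    · exact ih _ (findFrom_nonneg_of_ne cs ['\n'] (i+1) (by omega) h1)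

theorem loop_nonneg_succ (cs : List Char) (k : Nat) (i : Int) (h : -1 ≤ i) :
    0 ≤ getFirstLinesLoop cs (k + 1) i := by
  simp only [getFirstLinesLoop]
  split_ifs with h1
  · omega
  · exact loop_nonneg_of_nonneg cs k _ (findFrom_nonneg_of_ne cs ['\n'] (i+1) (by omega) h1)

theorem loop_shift : ∀ (k : Nat) (p b : List Char) (s : Nat), s ≤ b.length →
    getFirstLinesLoop (p ++ b) k ((p.length : Int) + (s : Int) - 1)
      = (p.length : Int) + getFirstLinesLoop b k ((s : Int) - 1) := by
  intro k
  induction k with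
  | zero => intro p b s _; simp [getFirstLinesLoop]; ring
  | succ k ih =>
    intro p b s hs
    simp only [getFirstLinesLoop]
    have e1 : (p.length : Int) + (s : Int) - 1 + 1 = ((p.length + s : Nat) : Int) := by push_cast; ring
    have e2 : (s : Int) - 1 + 1 = ((s : Nat) : Int) := by ring
    rw [e1, e2, PySem.Chars.findFrom_natCast (p ++ b) ['\n'] (p.length + s) (by simp; omega),
        PySem.Chars.findFrom_natCast b ['\n'] s hs]
    have edrop : List.drop (p.length + s) (p ++ b) = List.drop s b := by
      rw [List.drop_append]; simp
    rw [edrop]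
    by_cases hr : PySem.Chars.find (List.drop s b) ['\n'] = -1
    · simp [hr]
    · have hr0 : 0 ≤ PySem.Chars.find (List.drop s b) ['\n'] := by
        have := PySem.Chars.neg_one_le_find (List.drop s b) ['\n']; omega
      set r := PySem.Chars.find (List.drop s b) ['\n'] with hrdef
      rw [if_neg hr, if_neg (by omega : ¬ ((p.length + s : Nat) : Int) + r = -1),
          if_neg hr, if_neg (by omega : ¬ (s : Int) + r = -1)]
      have hpre := (PySem.Chars.find_spec (s := List.drop s b) (sub := ['\n']) hr0).1
      have hlen : s + r.toNat + 1 ≤ b.length := by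
        have h1 := hpre.length_le
        simp [List.length_drop] at h1
        omega
      have := ih p b (s + r.toNat + 1) hlen
      have er : (r.toNat : Int) = r := Int.toNat_of_nonneg hr0
      have eL : ((p.length + s : Nat) : Int) + r = (p.length : Int) + ((s + r.toNat + 1 : Nat) : Int) - 1 := by
        push_cast [er]; ring
      have eR : (s : Int) + r = ((s + r.toNat + 1 : Nat) : Int) - 1 := by push_cast [er]; ring
      rw [eL, eR, this]

theorem loop_ge_neg_one (cs : List Char) : ∀ (k : Nat) (i : Int), -1 ≤ i →
    -1 ≤ getFirstLinesLoop cs k i := by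
  intro k
  induction k with
  | zero => intro i h; simpa [getFirstLinesLoop] using h
  | succ k ih =>
    intro i h
    simp only [getFirstLinesLoop]
    split_ifs with h1
    · omega
    · exact ih _ (by have := findFrom_nonneg_of_ne cs ['\n'] (i+1) (by omega) h1; omega)

theorem main_lemma : ∀ (k : Nat) (cs : List Char),
    List.take (let i := getFirstLinesLoop cs k (-1); (if i = -1 then 0 else i)).toNat cs
      = PySem.Chars.join ['\n'] (List.take k (PySem.Chars.splitOn cs ['\n'])) := by
  intro k
  induction k with
  | zero => intro cs; simp [getFirstLinesLoop, PySem.Chars.join, List.intercalate]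
  | succ k ih =>
    intro cs
    simp only [getFirstLinesLoop]
    have e0 : (-1 : Int) + 1 = 0 := by ring
    rw [e0, PySem.Chars.findFrom_zero]
    by_cases hj : PySem.Chars.find cs ['\n'] = -1
    · rw [if_pos hj]
      have hnl : '\n' ∉ cs := by
        have := (PySem.Chars.find_eq_neg_one_iff cs ['\n']).mp hj
        rwa [List.singleton_infix_iff] at this
      rw [splitOn_eq_spl, spl_no_nl hnl]
      simp [PySem.Chars.join_singleton]
    · rw [if_neg hj]
      have hj0 : 0 ≤ PySem.Chars.find cs ['\n'] := by
        have := PySem.Chars.neg_one_le_find cs ['\n']; omega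
      set j := PySem.Chars.find cs ['\n'] with hjdef
      set jn := j.toNat with hjndef
      have erj : (jn : Int) = j := Int.toNat_of_nonneg hj0
      have hspec := PySem.Chars.find_spec (s := cs) (sub := ['\n']) hj0
      have hpre := hspec.1
      have hjlen : jn < cs.length := by
        have := hpre.length_le
        simp [List.length_drop] at this
        omega
      have hget : cs[jn]'hjlen = '\n' := by
        obtain ⟨u, hu⟩ := hpre
        rw [List.drop_eq_getElem_cons hjlen] at hu
        have := congrArg (fun l => l.headD ' ') hu.symm
        simpa [List.getElem?_eq_getElem hjlen] using this
      have hcs : cs = cs.take jn ++ '\n' :: cs.drop (jn + 1) := by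
        conv_lhs => rw [← List.take_append_drop jn cs]
        rw [List.drop_eq_getElem_cons hjlen, hget]
      set p := cs.take jn with hpdef
      set t := cs.drop (jn + 1) with htdef
      have hplen : p.length = jn := by simp [hpdef]; omega
      have hnp : '\n' ∉ p := by
        intro hmem
        obtain ⟨i, hi, hie⟩ := List.getElem_of_mem hmem
        have hilt : i < jn := by omega
        apply hspec.2 i hilt
        have hicl : i < cs.length := by omega
        have hcsi : cs[i]'hicl = '\n' := by
          have : p[i]'hi = cs[i]'hicl := by
            simp [hpdef, List.getElem_take]
          rw [← this, hie]
        rw [List.drop_eq_getElem_cons hicl, hcsi]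
        exact ⟨cs.drop (i+1), rfl⟩
      have hshift : getFirstLinesLoop cs k j
          = ((jn + 1 : Nat) : Int) + getFirstLinesLoop t k (-1) := by
        have hsh := loop_shift k (p ++ ['\n']) t 0 (Nat.zero_le _)
        have hcs2 : (p ++ ['\n']) ++ t = cs := by
          rw [List.append_assoc]; exact hcs.symm
        rw [hcs2] at hsh
        have e1 : ((p ++ ['\n']).length : Int) + ((0:Nat) : Int) - 1 = j := by
          simp [hplen]; omega
        have e2 : ((0:Nat) : Int) - 1 = -1 := by simp
        rw [e1, e2] at hsh
        rw [hsh]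
        simp [hplen]
      rw [hshift, splitOn_eq_spl, hcs, spl_append t hnp]
      set r := getFirstLinesLoop t k (-1) with hrdef
      cases k with
      | zero =>
        have hr : r = -1 := by rw [hrdef]; rfl
        rw [hr]
        have ev : ((jn + 1 : Nat) : Int) + -1 = (jn : Int) := by push_cast; ring
        rw [ev, if_neg (by omega : ¬ (jn : Int) = -1)]
        have : ((jn : Int)).toNat = jn := by omega
        rw [this, ← hplen, List.take_left]
        simp [PySem.Chars.join_singleton]
      | succ k' =>
        have hr0 : 0 ≤ r := loop_nonneg_succ t k' (-1) (by omega)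
        have ev : (((jn + 1 : Nat) : Int) + r).toNat = p.length + (1 + r.toNat) := by
          rw [hplen]; omega
        rw [if_neg (by omega : ¬ ((jn + 1 : Nat) : Int) + r = -1), ev,
            List.take_length_add_append, List.take_succ_cons]
        have hiht := ih t
        rw [← hrdef, if_neg (by omega : ¬ r = -1)] at hiht
        rw [splitOn_eq_spl] at hiht
        rw [List.take_succ_cons] at hiht
        simp only [show (1 + r.toNat) = r.toNat + 1 from by omega, List.take_succ_cons]
        rw [PySem.Chars.join_cons_cons, ← hiht]
        simp

-- ===== VERDICT (by name: the statement is the Claim_ definition above) =====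
theorem getFirstLines_spec : Claim_equal_getFirstLines := by
  intro text n _
  unfold Spec_getFirstLines getFirstLines getFirstLines_alt
  show String.ofList (PySem.Chars.slice text.toList none
      (some (if getFirstLinesLoop text.toList n.toNat (-1) = -1 then 0
        else getFirstLinesLoop text.toList n.toNat (-1)))) = _
  have hge : -1 ≤ getFirstLinesLoop text.toList n.toNat (-1) :=
    loop_ge_neg_one text.toList n.toNat (-1) (by omega)
  have h0 : 0 ≤ (if getFirstLinesLoop text.toList n.toNat (-1) = -1 then 0
      else getFirstLinesLoop text.toList n.toNat (-1)) := by
    split_ifs <;> omega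
  rw [show ∀ (l : List Char) (a b : Option Int), PySem.Chars.slice l a b = PySem.List.slice l a b from fun _ _ _ => rfl,
      PySem.List.slice_to _ h0]
  have hm : (max 0 n).toNat = n.toNat := by omega
  rw [hm]
  exact congrArg String.ofList (main_lemma n.toNat text.toList)
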